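-- pv_equiv track=rewrite | github.com/psaikko/AdventOfCode2017 | 6/reallocation.py | reallocate
-- ===== SOURCE A (Python) =====
-- def reallocate(b):
-- 	m = max(b)
-- 	i = b.index(m)
-- 	b[i] = 0;
-- 	while m > 0:
-- 		i += 1
-- 		b[i % len(b)] += 1
-- 		m -= 1
-- 	return b
-- ===== SOURCE B (Python) =====
-- def reallocate(b):
--     n = len(b)
--     m = max(b)
--     i = b.index(m)
--     b[i] = 0
--     if m > 0:
--         q, r = divmod(m, n)
--         for j in range(n):
--             b[j] += q + (1 if (j - i - 1) % n < r else 0)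
--     return b
-- ===== Notes on version B (the rewrite author's own statement) =====
-- stated objective: faster
-- what changed: A distributes the max value one block at a time in an O(m) while-loop; B computes the round-robin distribution in closed form with divmod and adds q plus a remainder indicator to each bucket in one O(n) pass.
import Mathlib
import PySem

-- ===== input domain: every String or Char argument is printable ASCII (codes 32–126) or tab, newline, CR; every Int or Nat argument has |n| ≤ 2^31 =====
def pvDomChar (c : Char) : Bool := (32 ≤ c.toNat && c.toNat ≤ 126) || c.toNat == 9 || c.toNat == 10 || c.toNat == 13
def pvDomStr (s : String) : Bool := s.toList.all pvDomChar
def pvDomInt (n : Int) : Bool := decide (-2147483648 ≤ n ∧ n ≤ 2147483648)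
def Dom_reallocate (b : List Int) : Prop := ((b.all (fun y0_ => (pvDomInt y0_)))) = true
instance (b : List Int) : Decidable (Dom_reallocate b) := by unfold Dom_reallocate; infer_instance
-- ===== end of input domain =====

-- B replaces A's one-block-at-a-time O(max) while-loop by a closed-form divmod distribution
-- (each bucket gets q plus a remainder indicator) in one O(n) pass; equivalence is about the
-- RETURN value only (both Pythons also mutate the argument list in place in the same way).

-- ===== PORT A =====
-- while m > 0: i += 1; b[i % len(b)] += 1; m -= 1   (i stays ≥ 0, so Nat `%` is Python's `%` here)
def reallocLoopA (b : List Int) (i : Nat) : Nat → List Int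
  | 0 => b
  | m + 1 => reallocLoopA (b.modify ((i + 1) % b.length) (· + 1)) (i + 1) m

def reallocate (b : List Int) : List Int :=
  match PySem.List.max? b (fun x => x) with
  | none => b        -- unreachable under Pre_: max([]) raises ValueError
  | some m =>
    match PySem.List.index? b m with
    | none => b      -- unreachable: the max is a member
    | some i => reallocLoopA (b.set i 0) i m.toNat

-- ===== PORT B =====
def reallocate_alt (b : List Int) : List Int :=
  let n := b.length
  match PySem.List.max? b (fun x => x) with
  | none => b        -- unreachable under Pre_
  | some m =>
    match PySem.List.index? b m with
    | none => b      -- unreachable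
    | some i =>
      let b0 := b.set i 0
      if 0 < m then
        let q := PySem.Int.floordiv m (n : Int)
        let r := PySem.Int.mod m (n : Int)
        (List.range n).foldl
          (fun acc j => acc.modify j
            (fun x => x + q + (if PySem.Int.mod ((j : Int) - (i : Int) - 1) (n : Int) < r then 1 else 0)))
          b0
      else b0

-- ===== PRECONDITION & SPEC =====
-- Pre_ excludes only the empty list, on which A (and B) raise ValueError from max([]).
def Pre_reallocate (b : List Int) : Prop := b ≠ []
instance (b : List Int) : Decidable (Pre_reallocate b) := by unfold Pre_reallocate; infer_instance
def pvWitness_reallocate : List Int := [0, 2, 7, 0]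

def Spec_reallocate (b : List Int) (out : List Int) : Prop := out = reallocate_alt b
instance (b : List Int) (out : List Int) : Decidable (Spec_reallocate b out) := by unfold Spec_reallocate; infer_instance

-- ===== CLAIM (what is proved, stated in full; the proofs are below) =====
def Claim_equal_reallocate : Prop := ∀ (b : List Int), Dom_reallocate b → Pre_reallocate b → Spec_reallocate b (reallocate b)

-- ===== LEMMAS AND PROOFS =====

-- number of k ∈ [1..m] with (i+k) % n = j : the increments bucket j receives from A's loop
def pvCnt (i j n : Nat) : Nat → Nat
  | 0 => 0
  | m + 1 => (if (i + 1) % n = j then 1 else 0) + pvCnt (i + 1) j n m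

theorem reallocLoopA_length (i m : Nat) : ∀ b : List Int, (reallocLoopA b i m).length = b.length := by
  induction m generalizing i with
  | zero => intro b; rfl
  | succ m ih => intro b; simpa [reallocLoopA] using ih (i + 1) (b.modify ((i + 1) % b.length) (· + 1))

theorem getD_modify (l : List Int) (i j : Nat) (f : Int → Int) :
    (l.modify i f).getD j 0 = if i = j ∧ j < l.length then f (l.getD j 0) else l.getD j 0 := by
  have hlen : (l.modify i f).length = l.length := by simp
  by_cases h : j < l.length
  · have h' : j < (l.modify i f).length := by omega
    rw [List.getD_eq_getElem l 0 h, List.getD_eq_getElem _ 0 h', List.getElem_modify]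
    split_ifs <;> simp_all
  · rw [List.getD_eq_default _ _ (by omega), List.getD_eq_default _ _ (by omega)]
    simp [h]

theorem reallocLoopA_getD (m : Nat) : ∀ (b : List Int) (i j : Nat), j < b.length →
    (reallocLoopA b i m).getD j 0 = b.getD j 0 + (pvCnt i j b.length m : Int) := by
  induction m with
  | zero => intro b i j hj; simp [reallocLoopA, pvCnt]
  | succ m ih =>
    intro b i j hj
    have hlen : (b.modify ((i + 1) % b.length) (· + 1)).length = b.length := by simp
    rw [reallocLoopA, ih _ (i + 1) j (by omega), hlen, getD_modify]
    simp only [pvCnt]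
    split_ifs <;> push_cast <;> omega

theorem pvMod2b (n x : Nat) (_hn : 0 < n) (h1 : n ≤ x) (h2 : x < 2 * n) : x % n = x - n := by
  rw [Nat.mod_eq_sub_mod h1]; exact Nat.mod_eq_of_lt (by omega)

theorem pvCnt_succ (j n : Nat) (m : Nat) : ∀ i, pvCnt i j n (m + 1) = pvCnt i j n m + (if (i + 1 + m) % n = j then 1 else 0) := by
  induction m with
  | zero => intro i; simp [pvCnt]
  | succ m ih =>
    intro i
    show (if (i + 1) % n = j then 1 else 0) + pvCnt (i + 1) j n (m + 1) = _
    rw [ih (i + 1)]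
    simp only [pvCnt]
    have : i + 1 + 1 + m = i + 1 + (m + 1) := by omega
    rw [this]
    omega

theorem pvCnt_closed (i j n : Nat) (hn : 0 < n) (hj : j < n) :
    ∀ m, pvCnt i j n m = m / n + (if (j + n - (i + 1) % n) % n < m % n then 1 else 0) := by
  intro m
  induction m with
  | zero => simp [pvCnt]
  | succ m ih =>
    rw [pvCnt_succ, ih, Nat.add_mod (i + 1) m n]
    have ha : (i + 1) % n < n := Nat.mod_lt _ hn
    have hr : m % n < n := Nat.mod_lt _ hn
    have hdm := Nat.div_add_mod m n
    have hd : ((j + n - (i + 1) % n) % n = j + n - (i + 1) % n ∧ j + n - (i + 1) % n < n) ∨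
        ((j + n - (i + 1) % n) % n = j + n - (i + 1) % n - n ∧ n ≤ j + n - (i + 1) % n) := by
      rcases Nat.lt_or_ge (j + n - (i + 1) % n) n with h | h
      · exact Or.inl ⟨Nat.mod_eq_of_lt h, h⟩
      · exact Or.inr ⟨pvMod2b n _ hn h (by omega), h⟩
    have he : (((i + 1) % n + m % n) % n = (i + 1) % n + m % n ∧ (i + 1) % n + m % n < n) ∨
        (((i + 1) % n + m % n) % n = (i + 1) % n + m % n - n ∧ n ≤ (i + 1) % n + m % n) := by
      rcases Nat.lt_or_ge ((i + 1) % n + m % n) n with h | h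
      · exact Or.inl ⟨Nat.mod_eq_of_lt h, h⟩
      · exact Or.inr ⟨pvMod2b n _ hn h (by omega), h⟩
    have hmul : n * (m / n + 1) = n * (m / n) + n := by ring
    by_cases hrn : m % n + 1 = n
    · have h1 : (m + 1) / n = m / n + 1 ∧ (m + 1) % n = 0 :=
        (Nat.div_mod_unique hn).mpr ⟨by omega, hn⟩
      rw [h1.1, h1.2]
      clear h1 hmul hdm ih
      rcases hd with ⟨hd, hd'⟩ | ⟨hd, hd'⟩ <;> rcases he with ⟨he, he'⟩ | ⟨he, he'⟩ <;> rw [hd, he] <;>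
        split_ifs <;> omega
    · have h1 : (m + 1) / n = m / n ∧ (m + 1) % n = m % n + 1 :=
        (Nat.div_mod_unique hn).mpr ⟨by omega, by omega⟩
      rw [h1.1, h1.2]
      clear h1 hmul hdm ih
      rcases hd with ⟨hd, hd'⟩ | ⟨hd, hd'⟩ <;> rcases he with ⟨he, he'⟩ | ⟨he, he'⟩ <;> rw [hd, he] <;>
        split_ifs <;> omega

theorem foldB_length (f : Nat → Int → Int) (k : Nat) : ∀ b0 : List Int,
    ((List.range k).foldl (fun acc j => acc.modify j (f j)) b0).length = b0.length := by
  induction k with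
  | zero => intro b0; rfl
  | succ k ih => intro b0; rw [List.range_succ, List.foldl_append]; simp [ih]

theorem foldB_getD (f : Nat → Int → Int) (b0 : List Int) (j : Nat) (hj : j < b0.length) (k : Nat) :
    ((List.range k).foldl (fun acc j => acc.modify j (f j)) b0).getD j 0 =
      if j < k then f j (b0.getD j 0) else b0.getD j 0 := by
  induction k with
  | zero => simp
  | succ k ih =>
    rw [List.range_succ, List.foldl_append]
    simp only [List.foldl_cons, List.foldl_nil]
    rw [getD_modify, foldB_length, ih]
    split_ifs <;> simp_all <;> omega

theorem emod_eq_dNat (i j n : Nat) (hn : 0 < n) (hj : j < n) :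
    PySem.Int.mod ((j : Int) - (i : Int) - 1) (n : Int) = (((j + n - (i + 1) % n) % n : Nat) : Int) := by
  rw [PySem.Int.mod_eq_emod_of_pos (by exact_mod_cast hn)]
  obtain ⟨t, u, htu, hu⟩ : ∃ t u, n * t + u = i + 1 ∧ u < n :=
    ⟨(i + 1) / n, (i + 1) % n, Nat.div_add_mod _ _, Nat.mod_lt _ hn⟩
  have hmu : (i + 1) % n = u := ((Nat.div_mod_unique (a := i + 1) (d := t) (c := u) hn).mpr ⟨by omega, hu⟩).2
  rw [hmu]
  have htu' : (n : Int) * t + u = (i : Int) + 1 := by exact_mod_cast htu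
  have hmlt : (j + n - u) % n < n := Nat.mod_lt _ hn
  have hnn : (0 : Int) ≤ (((j + n - u) % n : Nat) : Int) := Int.natCast_nonneg _
  rcases Nat.lt_or_ge (j + n - u) n with h | h
  · have he1 : (j + n - u) % n = j + n - u := Nat.mod_eq_of_lt h
    have key : (j : Int) - (i : Int) - 1 + (n : Int) * ((t : Int) + 1) = (((j + n - u) % n : Nat) : Int) := by
      rw [he1]
      push_cast [Nat.cast_sub (by omega : u ≤ j + n)]
      linear_combination htu'
    calc ((j : Int) - (i : Int) - 1) % (n : Int)
        = ((j : Int) - (i : Int) - 1 + (n : Int) * ((t : Int) + 1)) % (n : Int) :=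
          (Int.add_mul_emod_self_left _ _ _).symm
      _ = (((j + n - u) % n : Nat) : Int) % (n : Int) := by rw [key]
      _ = (((j + n - u) % n : Nat) : Int) := Int.emod_eq_of_lt hnn (by exact_mod_cast hmlt)
  · have he2 : (j + n - u) % n = j + n - u - n := pvMod2b n _ hn h (by omega)
    have key : (j : Int) - (i : Int) - 1 + (n : Int) * (t : Int) = (((j + n - u) % n : Nat) : Int) := by
      rw [he2]
      push_cast [Nat.cast_sub (by omega : u ≤ j + n), Nat.cast_sub h]
      linear_combination htu'
    calc ((j : Int) - (i : Int) - 1) % (n : Int)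
        = ((j : Int) - (i : Int) - 1 + (n : Int) * (t : Int)) % (n : Int) :=
          (Int.add_mul_emod_self_left _ _ _).symm
      _ = (((j + n - u) % n : Nat) : Int) % (n : Int) := by rw [key]
      _ = (((j + n - u) % n : Nat) : Int) := Int.emod_eq_of_lt hnn (by exact_mod_cast hmlt)

-- ===== VERDICT (by name: the statement is the Claim_ definition above) =====
theorem reallocate_spec : Claim_equal_reallocate := by
  unfold Claim_equal_reallocate
  intro b _ hpre
  unfold Spec_reallocate
  cases hmax : PySem.List.max? b (fun x => x) with
  | none => simp [reallocate, reallocate_alt, hmax]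
  | some m =>
    cases hidx : PySem.List.index? b m with
    | none =>
      have hidx' : List.idxOf? m b = none := by simpa using hidx
      simp [reallocate, reallocate_alt, hmax, hidx']
    | some i =>
      have hidx' : List.idxOf? m b = some i := by simpa using hidx
      have hA : reallocate b = reallocLoopA (b.set i 0) i m.toNat := by
        simp [reallocate, hmax, hidx']
      have hB : reallocate_alt b = (if 0 < m then
          (List.range b.length).foldl
            (fun acc j => acc.modify j
              (fun x => x + PySem.Int.floordiv m (b.length : Int) +
                (if PySem.Int.mod ((j : Int) - (i : Int) - 1) (b.length : Int) < PySem.Int.mod m (b.length : Int) then 1 else 0)))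
            (b.set i 0)
        else b.set i 0) := by
        simp [reallocate_alt, hmax, hidx']
      rw [hA, hB]
      obtain ⟨hi, -, -⟩ := PySem.List.getElem_of_index?_eq_some hidx
      have hn : 0 < b.length := by omega
      by_cases hm : 0 < m
      · rw [if_pos hm]
        have hset : (b.set i 0).length = b.length := by simp
        apply List.ext_getElem
        · rw [reallocLoopA_length,
            foldB_length (fun j x => x + PySem.Int.floordiv m (b.length : Int) +
              (if PySem.Int.mod ((j : Int) - (i : Int) - 1) (b.length : Int) < PySem.Int.mod m (b.length : Int) then 1 else 0))]
        · intro j h1 h2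
          have hj : j < b.length := by rw [reallocLoopA_length, hset] at h1; exact h1
          rw [← List.getD_eq_getElem _ 0 h1, ← List.getD_eq_getElem _ 0 h2,
            reallocLoopA_getD m.toNat (b.set i 0) i j (by omega),
            foldB_getD (fun j x => x + PySem.Int.floordiv m (b.length : Int) +
              (if PySem.Int.mod ((j : Int) - (i : Int) - 1) (b.length : Int) < PySem.Int.mod m (b.length : Int) then 1 else 0))
              (b.set i 0) j (by omega) b.length,
            if_pos hj, hset, pvCnt_closed i j b.length hn hj, emod_eq_dNat i j b.length hn hj]
          have hmt : (m.toNat : Int) = m := Int.toNat_of_nonneg hm.le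
          have hq : PySem.Int.floordiv m (b.length : Int) = ((m.toNat / b.length : Nat) : Int) := by
            rw [← hmt]; exact_mod_cast PySem.Int.floordiv_natCast m.toNat b.length
          have hrr : PySem.Int.mod m (b.length : Int) = ((m.toNat % b.length : Nat) : Int) := by
            rw [← hmt]; exact_mod_cast PySem.Int.mod_natCast m.toNat b.length
          rw [hq, hrr]
          push_cast
          split_ifs with h3 h4 h4
          · ring
          · exfalso; exact h4 (by exact_mod_cast h3)
          · exfalso; exact h3 (by exact_mod_cast h4)
          · ring
      · rw [if_neg hm]
        have h0 : m.toNat = 0 := by omega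
        rw [h0]
        rfl
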